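-- pv_equiv track=rewrite | github.com/Hugo-Blvr/funAdapt_project | 05_benchmark/vf_bench_plot.py | pairwise_algn_to_multi
-- ===== SOURCE A (Python) =====
-- def pairwise_algn_to_multi(data_iso):
--     """
--     Convertit un dictionnaire de détections d'inversions en pair-alignment
--     vers un format multi-alignment avec positions fusionnées.
--
--     Args:
--         data: Dict {méthode: {chromosome: {isolat: [(start, end), ...]}}}
--
--     Returns:
--         Dict {méthode: {chromosome: [(start, end), ...]}}
--     """
--     result = {}
--
--     for method, chromosomes in data_iso.items():
--         result[method] = {}
--
--         for chromosome, isolats in chromosomes.items():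
--             # Collecter toutes les positions de tous les isolats
--             all_positions = []
--             for isolat, positions in isolats.items(): all_positions.extend(positions)
--
--             # Fusionner les intervalles qui se chevauchent ou sont contigus
--             if not all_positions:
--                 result[method][chromosome] = []
--                 continue
--
--             # Trier les intervalles par position de début
--             sorted_intervals = sorted(all_positions)
--             merged = [sorted_intervals[0]]
--
--             for current_start, current_end in sorted_intervals[1:]:
--                 last_start, last_end = merged[-1]
--                 # Si l'intervalle courant chevauche ou est contigu au dernier
--                 # Fusionner en prenant le max des positions de fin
--                 if current_start <= last_end + 1: merged[-1] = (last_start, max(last_end, current_end))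
--                 # Ajouter un nouvel intervalle
--                 else: merged.append((current_start, current_end))
--
--             result[method][chromosome] = merged
--
--     return result
-- ===== SOURCE B (Python) =====
-- def _merge(iv):
--     """Merge sorted intervals (gap<=1 counts as contiguous) in three passes:
--     1) flag region starts using the running max of ALL ends seen so far,
--     2) split the list into chunks at the flagged positions,
--     3) summarise each chunk as (first start, max end)."""
--     if not iv:
--         return []
--     flags = []
--     run = iv[0][1]
--     for s, e in iv[1:]:
--         flags.append(s > run + 1)
--         run = run if run >= e else e
--     chunks = [[iv[0]]]
--     for item, new in zip(iv[1:], flags):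
--         if new:
--             chunks.append([item])
--         else:
--             chunks[-1].append(item)
--     out = []
--     for c in chunks:
--         s0, hi = c[0]
--         for _, e in c[1:]:
--             hi = hi if hi >= e else e
--         out.append((s0, hi))
--     return out
--
--
-- def pairwise_algn_to_multi(data_iso):
--     return {
--         method: {
--             chromosome: _merge(sorted(p for positions in isolats.values() for p in positions))
--             for chromosome, isolats in chromosomes.items()
--         }
--         for method, chromosomes in data_iso.items()
--     }
-- ===== Notes on version B (the rewrite author's own statement) =====
-- stated objective: alternative
-- what changed: Per chromosome, replaces A's sort-then-merge loop that mutates the last merged interval with a three-pass scheme: flag region breaks with a running maximum over ALL interval ends seen so far, split the sorted list into chunks at the flagged positions, then summarise each chunk as (first start, max end); that the global running max may be used in place of the per-group max is the proved invariant.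
import Mathlib
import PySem

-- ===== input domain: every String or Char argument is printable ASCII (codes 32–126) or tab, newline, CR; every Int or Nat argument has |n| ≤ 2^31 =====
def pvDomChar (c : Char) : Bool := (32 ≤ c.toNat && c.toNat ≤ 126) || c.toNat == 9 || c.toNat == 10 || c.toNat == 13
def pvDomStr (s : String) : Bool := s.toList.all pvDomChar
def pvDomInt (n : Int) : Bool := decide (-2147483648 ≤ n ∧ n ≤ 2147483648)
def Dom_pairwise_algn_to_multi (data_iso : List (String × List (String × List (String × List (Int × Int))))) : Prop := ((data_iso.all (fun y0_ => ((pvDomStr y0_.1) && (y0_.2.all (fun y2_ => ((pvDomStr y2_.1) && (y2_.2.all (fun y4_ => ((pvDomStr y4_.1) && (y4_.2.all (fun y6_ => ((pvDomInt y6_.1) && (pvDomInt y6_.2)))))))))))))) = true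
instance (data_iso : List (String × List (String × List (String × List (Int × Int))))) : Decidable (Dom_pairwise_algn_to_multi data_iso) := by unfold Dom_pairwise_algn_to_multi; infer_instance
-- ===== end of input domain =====

-- B replaces A's mutate-last sort-and-merge with flag/split/summarise passes driven by a
-- global running max of ends ("alternative": same asymptotic cost, different algorithm).

-- ===== PORT A =====
-- the body of A's per-interval merge loop: merged[-1] is read, and either overwritten or a new interval appended
def pvStepA (merged : List (Int × Int)) (cur : Int × Int) : List (Int × Int) :=
  let last := merged.getLastD (0, 0)
  if cur.1 ≤ last.2 + 1 then merged.dropLast ++ [(last.1, max last.2 cur.2)]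
  else merged ++ [cur]

-- A's per-chromosome body: gather all isolate positions, sort, then the merge loop
def pvChromA (isolats : List (String × List (Int × Int))) : List (Int × Int) :=
  let all_positions := isolats.foldl (fun acc p => acc ++ p.2) []
  if all_positions = [] then []
  else
    let sorted_intervals := PySem.List.sorted all_positions (fun q => toLex q)
    match sorted_intervals with
    | [] => []  -- unreachable (sorted of a nonempty list is nonempty)
    | x :: rest => rest.foldl pvStepA [x]

def pairwise_algn_to_multi (data_iso : List (String × List (String × List (String × List (Int × Int))))) : List (String × List (String × List (Int × Int))) :=
  (data_iso.foldl
    (fun result mc =>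
      result.insert mc.1
        ((mc.2.foldl (fun inner cc => inner.insert cc.1 (pvChromA cc.2))
          (PySem.Dict.empty : PySem.Dict String (List (Int × Int)))).items))
    (PySem.Dict.empty : PySem.Dict String (List (String × List (Int × Int))))).items

-- ===== PORT B =====
-- pass 1 of Source B's _merge: flags[k] ↔ iv[k+1] starts a new region, via the running max of ALL ends so far
def pvFlagsB (run : Int) : List (Int × Int) → List Bool
  | [] => []
  | q :: t => decide (q.1 > run + 1) :: pvFlagsB (if run ≥ q.2 then run else q.2) t

-- Source B's _merge: flags, then chunk splitting, then per-chunk (first start, max end)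
def pvMergeB (iv : List (Int × Int)) : List (Int × Int) :=
  match iv with
  | [] => []
  | x :: rest =>
    let flags := pvFlagsB x.2 rest
    let chunks := (rest.zip flags).foldl
      (fun chunks pf =>
        if pf.2 then chunks ++ [[pf.1]]
        else chunks.dropLast ++ [chunks.getLastD [] ++ [pf.1]])
      [[x]]
    chunks.foldl
      (fun out c =>
        let first := c.headD (0, 0)
        let hi := (c.drop 1).foldl (fun hi q => if hi ≥ q.2 then hi else q.2) first.2
        out ++ [(first.1, hi)])
      []

-- B's per-chromosome body: gather (flattening comprehension), sort, _merge
def pvChromB (isolats : List (String × List (Int × Int))) : List (Int × Int) :=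
  pvMergeB (PySem.List.sorted (isolats.flatMap (·.2)) (fun q => toLex q))

def pairwise_algn_to_multi_alt (data_iso : List (String × List (String × List (String × List (Int × Int))))) : List (String × List (String × List (Int × Int))) :=
  (data_iso.foldl
    (fun result mc =>
      result.insert mc.1
        ((mc.2.foldl (fun inner cc => inner.insert cc.1 (pvChromB cc.2))
          (PySem.Dict.empty : PySem.Dict String (List (Int × Int)))).items))
    (PySem.Dict.empty : PySem.Dict String (List (String × List (Int × Int))))).items

-- ===== PRECONDITION & SPEC =====
def Spec_pairwise_algn_to_multi (data_iso : List (String × List (String × List (String × List (Int × Int))))) (out : List (String × List (String × List (Int × Int)))) : Prop := out = pairwise_algn_to_multi_alt data_iso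
instance (data_iso : List (String × List (String × List (String × List (Int × Int))))) (out : List (String × List (String × List (Int × Int)))) : Decidable (Spec_pairwise_algn_to_multi data_iso out) := by unfold Spec_pairwise_algn_to_multi; infer_instance

-- ===== CLAIM (what is proved, stated in full; the proofs are below) =====
def Claim_equal_pairwise_algn_to_multi : Prop := ∀ (data_iso : List (String × List (String × List (String × List (Int × Int))))), Dom_pairwise_algn_to_multi data_iso → Spec_pairwise_algn_to_multi data_iso (pairwise_algn_to_multi data_iso)


-- ===== LEMMAS AND PROOFS =====

-- the clean per-group recursion both merges are reduced to: (st, hi) is the open group, hi its max end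
def pvGm : Int → Int → List (Int × Int) → List (Int × Int)
  | st, hi, [] => [(st, hi)]
  | st, hi, q :: t => if q.1 ≤ hi + 1 then pvGm st (max hi q.2) t else (st, hi) :: pvGm q.1 q.2 t

-- B's fused recursion: like pvGm, but the break test uses run = max of ALL ends so far
def pvFuse : Int → Int → Int → List (Int × Int) → List (Int × Int)
  | st, hi, _, [] => [(st, hi)]
  | st, hi, run, q :: t =>
    if q.1 > run + 1 then (st, hi) :: pvFuse q.1 q.2 (max run q.2) t
    else pvFuse st (max hi q.2) (max run q.2) t

-- the summary of one chunk: (first start, running max of ends)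
def pvAggHi (hi : Int) (cs : List (Int × Int)) : Int :=
  cs.foldl (fun hi q => if hi ≥ q.2 then hi else q.2) hi

def pvAggOne (c : List (Int × Int)) : Int × Int :=
  ((c.headD (0, 0)).1, pvAggHi (c.headD (0, 0)).2 (c.drop 1))

theorem pvAggHi_append (hi : Int) (cs : List (Int × Int)) (q : Int × Int) :
    pvAggHi hi (cs ++ [q]) = max (pvAggHi hi cs) q.2 := by
  simp only [pvAggHi, List.foldl_append, List.foldl_cons, List.foldl_nil]
  split <;> omega

theorem pvIfMax (a b : Int) : (if a ≥ b then a else b) = max a b := by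
  split <;> omega

-- A's merge loop is pvGm (the accumulator is always finished-groups ++ [open group])
theorem pvStepA_loop (t : List (Int × Int)) : ∀ (P : List (Int × Int)) (st hi : Int),
    t.foldl pvStepA (P ++ [(st, hi)]) = P ++ pvGm st hi t := by
  induction t with
  | nil => intro P st hi; simp [pvGm]
  | cons q t ih =>
    intro P st hi
    simp only [List.foldl_cons, pvStepA, List.getLastD_concat, List.dropLast_concat, pvGm]
    by_cases h : q.1 ≤ hi + 1
    · simp only [if_pos h]
      exact ih P st (max hi q.2)
    · simp only [if_neg h]
      have := ih (P ++ [(st, hi)]) q.1 q.2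
      simpa using this

-- B's chunk-splitting pass, summarised chunkwise, is pvFuse
theorem pvChunk_loop (rest : List (Int × Int)) : ∀ (run : Int)
    (done : List (List (Int × Int))) (c0 : Int × Int) (cs : List (Int × Int)),
    ((rest.zip (pvFlagsB run rest)).foldl
      (fun chunks pf =>
        if pf.2 then chunks ++ [[pf.1]]
        else chunks.dropLast ++ [chunks.getLastD [] ++ [pf.1]])
      (done ++ [c0 :: cs])).map pvAggOne
    = done.map pvAggOne ++ pvFuse c0.1 (pvAggHi c0.2 cs) run rest := by
  induction rest with
  | nil =>
    intro run done c0 cs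
    simp [pvFuse, pvAggOne]
  | cons q t ih =>
    intro run done c0 cs
    simp only [pvFlagsB, List.zip_cons_cons, List.foldl_cons, pvFuse, pvIfMax]
    by_cases h : q.1 > run + 1
    · simp only [h, decide_true, if_pos]
      have e1 : (done ++ [c0 :: cs]) ++ [[q]] = (done ++ [c0 :: cs]) ++ [q :: ([] : List (Int × Int))] := rfl
      rw [e1, ih (max run q.2) (done ++ [c0 :: cs]) q []]
      simp [pvAggOne, pvAggHi]
    · simp only [h, decide_false, Bool.false_eq_true, if_false, List.getLastD_concat,
        List.dropLast_concat]
      have e1 : done ++ [(c0 :: cs) ++ [q]] = done ++ [c0 :: (cs ++ [q])] := by simp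
      rw [e1, ih (max run q.2) done c0 (cs ++ [q]), pvAggHi_append]

-- pvFuse = pvGm on start-sorted input: invariant hi ≤ run, and run exceeds hi only when every
-- remaining start jumps past run + 1
theorem pvFuse_eq_pvGm (t : List (Int × Int)) : ∀ (st hi run : Int), hi ≤ run →
    (run = hi ∨ ∀ q ∈ t, q.1 > run + 1) → t.Pairwise (fun a b => a.1 ≤ b.1) →
    pvFuse st hi run t = pvGm st hi t := by
  induction t with
  | nil => intro st hi run _ _ _; rfl
  | cons q t ih =>
    intro st hi run hle hinv hpw
    rcases List.pairwise_cons.mp hpw with ⟨hq, hpw'⟩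
    simp only [pvFuse, pvGm]
    by_cases hcut : q.1 > run + 1
    · have hcut2 : ¬ q.1 ≤ hi + 1 := by omega
      rw [if_pos hcut, if_neg hcut2]
      congr 1
      refine ih q.1 q.2 (max run q.2) (le_max_right _ _) ?_ hpw'
      rcases le_total run q.2 with hr | hr
      · left; exact max_eq_right hr
      · right; intro x hx
        have := hq x hx
        omega
    · have hrh : run = hi := by
        rcases hinv with h | h
        · exact h
        · exact absurd (h q (by simp)) hcut
      have hcut2 : q.1 ≤ hi + 1 := by omega
      rw [if_neg hcut, if_pos hcut2]
      subst hrh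
      exact ih st (max run q.2) (max run q.2) le_rfl (Or.inl rfl) hpw'

-- per-chromosome: A's body equals B's body
theorem pvChrom_eq (cc : List (String × List (Int × Int))) : pvChromA cc = pvChromB cc := by
  unfold pvChromA pvChromB
  rw [PySem.List.foldl_append_eq_flatMap]
  simp only [List.nil_append]
  by_cases h : cc.flatMap (fun p => p.2) = []
  · rw [if_pos h, h]
    rfl
  · rw [if_neg h]
    have hs : PySem.List.sorted (cc.flatMap fun p => p.2) (fun q => toLex q) ≠ [] := by
      intro hc; exact h ((PySem.List.sorted_eq_nil_iff _ _ _).mp hc)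
    cases hsort : PySem.List.sorted (cc.flatMap fun p => p.2) (fun q => toLex q) with
    | nil => exact absurd hsort hs
    | cons x rest =>
      have hA : rest.foldl pvStepA [x] = pvGm x.1 x.2 rest := by
        have := pvStepA_loop rest [] x.1 x.2
        simpa using this
      have hB : pvMergeB (x :: rest) = pvFuse x.1 x.2 x.2 rest := by
        show ((rest.zip (pvFlagsB x.2 rest)).foldl
            (fun chunks pf =>
              if pf.2 then chunks ++ [[pf.1]]
              else chunks.dropLast ++ [chunks.getLastD [] ++ [pf.1]]) [[x]]).foldl
            (fun out c => out ++ [pvAggOne c]) [] = pvFuse x.1 x.2 x.2 rest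
        rw [PySem.List.foldl_append_singleton_eq_map]
        have := pvChunk_loop rest x.2 [] x []
        simpa [pvAggHi] using this
      have hpw : rest.Pairwise (fun a b => a.1 ≤ b.1) := by
        have hp := PySem.List.sorted_pairwise (cc.flatMap fun p => p.2) (fun q => toLex q)
        rw [hsort] at hp
        have := (List.pairwise_cons.mp hp).2
        refine this.imp ?_
        intro a b hab
        rcases Prod.Lex.le_iff.mp hab with h1 | ⟨h1, _⟩
        · exact le_of_lt h1
        · exact le_of_eq h1
      show List.foldl pvStepA [x] rest = pvMergeB (x :: rest)
      rw [hA, hB, pvFuse_eq_pvGm rest x.1 x.2 x.2 le_rfl (Or.inl rfl) hpw]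

-- ===== VERDICT (by name: the statement is the Claim_ definition above) =====
theorem pairwise_algn_to_multi_spec : Claim_equal_pairwise_algn_to_multi := by
  intro data_iso _
  unfold Spec_pairwise_algn_to_multi pairwise_algn_to_multi pairwise_algn_to_multi_alt
  rw [funext pvChrom_eq]
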